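-- pv_equiv track=rewrite | github.com/Diegolin11/Practicas- | practicas pyrhon/practicas pyrhon/Dia5/funciones dinamicas/ejemplo_funciones.py | cafe_caro
-- ===== SOURCE A (Python) =====
-- def cafe_caro(lista_precios):
--     precio_mayor = 0
--     cafe_caro = ''
--
--     for cafe,precio in lista_precios:
--         if precio > precio_mayor:
--             precio_mayor=precio
--             cafe_caro = cafe
--         else:
--             pass
--     return(cafe_caro,precio_mayor)
-- ===== SOURCE B (Python) =====
-- def cafe_caro(lista_precios):
--     # sort-then-take-top: sentinel ('', 0) first, stable descending sort by price
--     return sorted([('', 0)] + list(lista_precios), key=lambda x: x[1], reverse=True)[0]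
-- ===== Notes on version B (the rewrite author's own statement) =====
-- stated objective: alternative
-- what changed: Replaces the running-max scan with sort-then-take-top: prepend a ('', 0) sentinel, stable-sort descending by price, return the first element (stability preserves A's first-strict-max tie-breaking and the sentinel reproduces the empty/all-nonpositive case).
import Mathlib
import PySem

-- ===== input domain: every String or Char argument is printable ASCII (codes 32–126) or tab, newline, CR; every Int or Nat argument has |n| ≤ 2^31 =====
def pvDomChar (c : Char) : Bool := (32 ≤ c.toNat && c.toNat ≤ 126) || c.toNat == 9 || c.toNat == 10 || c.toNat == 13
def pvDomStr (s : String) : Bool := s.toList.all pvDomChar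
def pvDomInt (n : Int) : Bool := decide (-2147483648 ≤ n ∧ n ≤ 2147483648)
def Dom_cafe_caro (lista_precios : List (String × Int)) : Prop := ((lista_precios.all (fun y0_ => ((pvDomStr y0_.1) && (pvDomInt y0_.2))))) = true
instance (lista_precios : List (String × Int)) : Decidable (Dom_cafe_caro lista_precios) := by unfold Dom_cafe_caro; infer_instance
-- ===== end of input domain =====

-- B replaces A's running-max scan by sort-then-take-top: prepend a ('', 0) sentinel,
-- stable-sort descending by price, return the first element (objective: alternative).

-- ===== PORT A =====
-- state (cafe_caro, precio_mayor); the loop keeps the pair iff the new price is strictly greater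
def cafe_caro (lista_precios : List (String × Int)) : String × Int :=
  lista_precios.foldl
    (fun st cp => if cp.2 > st.2 then (cp.1, cp.2) else st)
    ("", 0)

-- ===== PORT B =====
-- sorted([('', 0)] + lista_precios, key=lambda x: x[1], reverse=True)[0];
-- the sorted list is nonempty (sentinel), so [0] is the head (headD default never used)
def cafe_caro_alt (lista_precios : List (String × Int)) : String × Int :=
  (PySem.List.sorted (("", 0) :: lista_precios) (fun x => x.2) true).headD ("", 0)

-- ===== PRECONDITION & SPEC =====
def Spec_cafe_caro (lista_precios : List (String × Int)) (out : String × Int) : Prop := out = cafe_caro_alt lista_precios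
instance (lista_precios : List (String × Int)) (out : String × Int) : Decidable (Spec_cafe_caro lista_precios out) := by unfold Spec_cafe_caro; infer_instance

-- ===== CLAIM (what is proved, stated in full; the proofs are below) =====
def Claim_equal_cafe_caro : Prop := ∀ (lista_precios : List (String × Int)), Dom_cafe_caro lista_precios → Spec_cafe_caro lista_precios (cafe_caro lista_precios)

-- ===== LEMMAS AND PROOFS =====

-- head of the insertion-sort accumulator after folding the rest of the list:
-- it evolves exactly as A's running maximum (strict comparison, first winner kept)
theorem head_foldl_insertBy (l : List (String × Int)) :
    ∀ (h : String × Int) (t : List (String × Int)) (d : String × Int),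
    ((l.foldl (fun acc x =>
        PySem.List.insertBy (fun a b => decide ((fun y : String × Int => y.2) b < (fun y : String × Int => y.2) a)) x acc)
        (h :: t)).headD d)
      = l.foldl (fun st cp => if cp.2 > st.2 then (cp.1, cp.2) else st) h := by
  induction l with
  | nil => intro h t d; rfl
  | cons x l ih =>
    intro h t d
    by_cases hx : h.2 < x.2
    · simpa [hx, PySem.List.insertBy] using ih x (h :: t) d
    · simpa [hx, PySem.List.insertBy] using
        ih h (PySem.List.insertBy (fun a b : String × Int => decide (b.2 < a.2)) x t) d

theorem cafe_caro_eq (lista_precios : List (String × Int)) :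
    cafe_caro lista_precios = cafe_caro_alt lista_precios := by
  unfold cafe_caro cafe_caro_alt
  rw [PySem.List.sorted_rev_eq_foldl_insertBy]
  simp only [List.foldl_cons, PySem.List.insertBy]
  rw [head_foldl_insertBy]

-- ===== VERDICT (by name: the statement is the Claim_ definition above) =====
theorem cafe_caro_spec : Claim_equal_cafe_caro := by
  intro l _
  show cafe_caro l = cafe_caro_alt l
  exact cafe_caro_eq l
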